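-- pv_equiv track=rewrite | github.com/rcore-os/tgoskits | scripts/repo/remove_cargo_workspace.py | remove_workspace_section
-- ===== SOURCE A (Python) =====
-- def remove_workspace_section(toml_lines):
--     """
--     从 TOML 内容中移除 [workspace] 及其子节点。
--     """
--     result = []
--     i = 0
--
--     while i < len(toml_lines):
--         line = toml_lines[i]
--         stripped = line.strip()
--
--         # 检测 [workspace] 或 [workspace.xxx]
--         if stripped.startswith('[workspace') and stripped.endswith(']'):
--             # 跳过整个 workspace 部分
--             i += 1
--             # 跳过所有子节点，直到遇到同级或更高级别的表
--             while i < len(toml_lines):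
--                 next_line = toml_lines[i]
--                 next_stripped = next_line.strip()
--                 # 遇到新的表定义（非 workspace 子节点）
--                 if next_stripped.startswith('['):
--                     if not next_stripped.startswith('[workspace'):
--                         break
--                     i += 1
--                 else:
--                     i += 1
--             continue
--
--         result.append(line)
--         i += 1
--
--     return result
-- ===== SOURCE B (Python) =====
-- def remove_workspace_section(toml_lines):
--     """
--     从 TOML 内容中移除 [workspace] 及其子节点。
--     Two-phase: group lines into a preamble plus (header, body) sections,
--     then filter sections with a 'skipping' flag.
--     """
--     preamble = []
--     sections = []  # list of (header_line, body_lines)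
--     cur = None
--     for line in toml_lines:
--         if line.strip().startswith('['):
--             if cur is not None:
--                 sections.append(cur)
--             cur = (line, [])
--         else:
--             if cur is None:
--                 preamble.append(line)
--             else:
--                 cur[1].append(line)
--     if cur is not None:
--         sections.append(cur)
--
--     result = list(preamble)
--     skipping = False
--     for header, body in sections:
--         h = header.strip()
--         if skipping and h.startswith('[workspace'):
--             continue
--         skipping = h.startswith('[workspace') and h.endswith(']')
--         if not skipping:
--             result.append(header)
--             result.extend(body)
--     return result
-- ===== Notes on version B (the rewrite author's own statement) =====
-- stated objective: alternative
-- what changed: A is a single index-driven while loop with a nested skip loop re-stripping and re-testing lines; B is two phases: one fold grouping the lines into a preamble plus (header, body) sections, then a fold filtering whole sections with a skipping flag.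
import Mathlib
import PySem

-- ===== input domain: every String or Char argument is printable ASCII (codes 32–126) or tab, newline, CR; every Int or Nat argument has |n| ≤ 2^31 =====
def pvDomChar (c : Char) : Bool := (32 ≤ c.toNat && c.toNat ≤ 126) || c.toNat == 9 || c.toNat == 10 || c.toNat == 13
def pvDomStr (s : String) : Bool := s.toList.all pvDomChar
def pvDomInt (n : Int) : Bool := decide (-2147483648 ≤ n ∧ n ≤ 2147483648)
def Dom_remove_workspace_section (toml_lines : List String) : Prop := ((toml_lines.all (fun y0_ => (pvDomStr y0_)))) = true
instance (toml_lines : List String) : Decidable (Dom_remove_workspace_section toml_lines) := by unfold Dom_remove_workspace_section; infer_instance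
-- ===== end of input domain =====

-- B regroups the lines into preamble + (header, body) sections and filters whole
-- sections with a skipping flag (different decomposition, same cost; objective: alternative).

-- ===== PORT A =====
-- inner while loop of A: skip lines until a non-workspace table header
def skipA : List String → List String
  | [] => []
  | l :: rest =>
    let s := PySem.Str.strip l
    if PySem.Str.startswith s "[" then
      if !(PySem.Str.startswith s "[workspace") then l :: rest
      else skipA rest
    else skipA rest

theorem skipA_length_le : ∀ (l : List String), (skipA l).length ≤ l.length := by
  intro l
  induction l with
  | nil => simp [skipA]
  | cons x t ih =>
    simp only [skipA]
    split <;> [skip; exact le_trans ih (Nat.le_succ _)]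
    split
    · exact le_refl _
    · exact le_trans ih (Nat.le_succ _)

def remove_workspace_section : List String → List String
  | [] => []
  | line :: rest =>
    let s := PySem.Str.strip line
    if PySem.Str.startswith s "[workspace" && PySem.Str.endswith s "]" then
      remove_workspace_section (skipA rest)
    else
      line :: remove_workspace_section rest
termination_by l => l.length
decreasing_by
  · exact Nat.lt_succ_of_le (skipA_length_le rest)
  · simp

-- ===== PORT B =====
-- phase 1 fold step: group lines into (preamble, finished sections, open section)
def stepSplit (st : List String × List (String × List String) × Option (String × List String))
    (line : String) : List String × List (String × List String) × Option (String × List String) :=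
  let pre := st.1
  let secs := st.2.1
  let cur := st.2.2
  if PySem.Str.startswith (PySem.Str.strip line) "[" then
    match cur with
    | none => (pre, secs, some (line, []))
    | some c => (pre, secs ++ [c], some (line, []))
  else
    match cur with
    | none => (pre ++ [line], secs, none)
    | some c => (pre, secs, some (c.1, c.2 ++ [line]))

-- phase 2 fold step: keep or drop a whole section, maintaining the skipping flag
def stepFilt (st : List String × Bool) (sec : String × List String) : List String × Bool :=
  let res := st.1
  let sk := st.2
  let h := PySem.Str.strip sec.1
  if sk && PySem.Str.startswith h "[workspace" then (res, sk)
  else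
    let sk' := PySem.Str.startswith h "[workspace" && PySem.Str.endswith h "]"
    if !sk' then (res ++ sec.1 :: sec.2, sk') else (res, sk')

def remove_workspace_section_alt (toml_lines : List String) : List String :=
  let st := toml_lines.foldl stepSplit ([], [], none)
  let sections := st.2.1 ++ (match st.2.2 with | none => [] | some c => [c])
  (sections.foldl stepFilt (st.1, false)).1

-- ===== PRECONDITION & SPEC =====
def Spec_remove_workspace_section (toml_lines : List String) (out : List String) : Prop := out = remove_workspace_section_alt toml_lines
instance (toml_lines : List String) (out : List String) : Decidable (Spec_remove_workspace_section toml_lines out) := by unfold Spec_remove_workspace_section; infer_instance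

-- ===== CLAIM (what is proved, stated in full; the proofs are below) =====
def Claim_equal_remove_workspace_section : Prop := ∀ (toml_lines : List String), Dom_remove_workspace_section toml_lines → Spec_remove_workspace_section toml_lines (remove_workspace_section toml_lines)

-- ===== LEMMAS AND PROOFS =====

def isHdr (l : String) : Bool := PySem.Str.startswith (PySem.Str.strip l) "["

def wsHdr (l : String) : Bool := PySem.Str.startswith (PySem.Str.strip l) "[workspace"

-- recursive characterisation of phase 1
def grpFrom (h : String) (b : List String) : List String → List (String × List String)
  | [] => [(h, b)]
  | l :: t => if isHdr l then (h, b) :: grpFrom l [] t else grpFrom h (b ++ [l]) t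

def preSplit : List String → List String × List (String × List String)
  | [] => ([], [])
  | l :: t =>
    if isHdr l then ([], grpFrom l [] t)
    else (l :: (preSplit t).1, (preSplit t).2)

-- recursive characterisation of phase 2
def filt : Bool → List (String × List String) → List String
  | _, [] => []
  | sk, (h, b) :: t =>
    if sk && wsHdr h then filt true t
    else if wsHdr h && PySem.Str.endswith (PySem.Str.strip h) "]" then filt true t
    else h :: (b ++ filt false t)

def flat : List (String × List String) → List String
  | [] => []
  | (h, b) :: t => h :: (b ++ flat t)

def OKsec (p : String × List String) : Prop := isHdr p.1 = true ∧ ∀ l ∈ p.2, isHdr l = false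

theorem ws_imp_lb (s : String) (h : PySem.Str.startswith s "[workspace" = true) :
    PySem.Str.startswith s "[" = true := by
  simp only [PySem.Str.startswith_eq, PySem.Chars.startswith_iff] at *
  exact List.IsPrefix.trans (by decide) h

theorem nonhdr_not_ws (l : String) (h : isHdr l = false) : wsHdr l = false := by
  cases hw : wsHdr l
  · rfl
  · exact absurd (ws_imp_lb _ hw) (by simp [isHdr] at h; simp [h])

theorem rws_keep (l : String) (x : List String) (h : isHdr l = false) :
    remove_workspace_section (l :: x) = l :: remove_workspace_section x := by
  have hw := nonhdr_not_ws l h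
  simp [wsHdr] at hw
  rw [remove_workspace_section]
  simp [hw]

theorem rws_keep_app (b x : List String) (h : ∀ l ∈ b, isHdr l = false) :
    remove_workspace_section (b ++ x) = b ++ remove_workspace_section x := by
  induction b with
  | nil => simp
  | cons l t ih =>
    simp only [List.cons_append]
    rw [rws_keep l _ (h l (by simp)), ih (fun y hy => h y (by simp [hy]))]

theorem skipA_nonhdr (b x : List String) (h : ∀ l ∈ b, isHdr l = false) :
    skipA (b ++ x) = skipA x := by
  induction b with
  | nil => simp
  | cons l t ih =>
    have hl := h l (by simp)
    simp [isHdr] at hl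
    simp only [List.cons_append, skipA]
    rw [if_neg (by simp [hl])]
    exact ih (fun y hy => h y (by simp [hy]))

theorem skipA_ws (l : String) (rest : List String) (hh : isHdr l = true) (hw : wsHdr l = true) :
    skipA (l :: rest) = skipA rest := by
  simp [isHdr] at hh
  simp [wsHdr] at hw
  simp [skipA, hh, hw]

theorem skipA_nws (l : String) (rest : List String) (hh : isHdr l = true) (hw : wsHdr l = false) :
    skipA (l :: rest) = l :: rest := by
  simp [isHdr] at hh
  simp [wsHdr] at hw
  simp [skipA, hh, hw]

theorem FT (secs : List (String × List String)) (hOK : ∀ p ∈ secs, OKsec p) :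
    remove_workspace_section (flat secs) = filt false secs ∧
    remove_workspace_section (skipA (flat secs)) = filt true secs := by
  induction secs with
  | nil => simp [flat, filt, skipA, remove_workspace_section]
  | cons p t ih =>
    obtain ⟨h, b⟩ := p
    obtain ⟨hh, hb⟩ := hOK (h, b) (by simp)
    have iht := ih (fun q hq => hOK q (by simp [hq]))
    cases hw : wsHdr h
    · -- non-workspace header: both flags keep the section
      have hwc := hw
      simp [wsHdr] at hwc
      have hkeep : remove_workspace_section (flat ((h, b) :: t)) = h :: (b ++ filt false t) := by
        simp only [flat]
        rw [remove_workspace_section]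
        simp only [PySem.Str.startswith_eq, PySem.Str.endswith_eq, PySem.Str.toList_strip]
        simp [hwc]
        rw [rws_keep_app b _ hb, iht.1]
      constructor
      · rw [hkeep]; simp [filt, hw]
      · simp only [flat]
        rw [skipA_nws h _ hh hw]
        have h2 := hkeep; simp only [flat] at h2
        rw [h2]; simp [filt, hw]
    · -- workspace header
      have hwc := hw
      simp [wsHdr] at hwc
      cases he : PySem.Str.endswith (PySem.Str.strip h) "]"
      · -- no closing ']': kept when not skipping, dropped when skipping
        have hec := he
        simp at hec
        constructor
        · simp only [flat]
          rw [remove_workspace_section]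
          simp only [PySem.Str.startswith_eq, PySem.Str.endswith_eq, PySem.Str.toList_strip]
          simp [hwc, hec]
          rw [rws_keep_app b _ hb, iht.1]
          simp [filt, hw, hec]
        · simp only [flat]
          rw [skipA_ws h _ hh hw, skipA_nonhdr b _ hb, iht.2]
          simp [filt, hw]
      · -- full '[workspace…]' header: dropped in both states
        have hec := he
        simp at hec
        constructor
        · simp only [flat]
          rw [remove_workspace_section]
          simp only [PySem.Str.startswith_eq, PySem.Str.endswith_eq, PySem.Str.toList_strip]
          simp [hwc, hec]
          rw [skipA_nonhdr b _ hb, iht.2]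
          simp [filt, hw, hec]
        · simp only [flat]
          rw [skipA_ws h _ hh hw, skipA_nonhdr b _ hb, iht.2]
          simp [filt, hw]

theorem flat_grpFrom : ∀ (t : List String) (h : String) (b : List String),
    flat (grpFrom h b t) = h :: (b ++ t) := by
  intro t
  induction t with
  | nil => intro h b; simp [grpFrom, flat]
  | cons l t ih =>
    intro h b
    by_cases hl : isHdr l = true
    · simp [grpFrom, hl, flat, ih]
    · simp only [grpFrom, if_neg hl]
      rw [ih]; simp

theorem OK_grpFrom : ∀ (t : List String) (h : String) (b : List String),
    isHdr h = true → (∀ l ∈ b, isHdr l = false) →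
    ∀ p ∈ grpFrom h b t, OKsec p := by
  intro t
  induction t with
  | nil =>
    intro h b hh hb p hp
    simp [grpFrom] at hp
    subst hp; exact ⟨hh, hb⟩
  | cons l t ih =>
    intro h b hh hb p hp
    by_cases hl : isHdr l = true
    · simp only [grpFrom, if_pos hl, List.mem_cons] at hp
      rcases hp with hp | hp
      · subst hp; exact ⟨hh, hb⟩
      · exact ih l [] hl (by simp) p hp
    · simp only [grpFrom] at hp
      rw [if_neg hl] at hp
      refine ih h (b ++ [l]) hh ?_ p hp
      intro y hy
      simp at hy
      rcases hy with hy | hy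
      · exact hb y hy
      · subst hy; simp_all

theorem A_eq (ls : List String) :
    remove_workspace_section ls = (preSplit ls).1 ++ filt false (preSplit ls).2 := by
  induction ls with
  | nil => simp [preSplit, remove_workspace_section, filt]
  | cons l t ih =>
    by_cases hl : isHdr l = true
    · simp only [preSplit, if_pos hl, List.nil_append]
      have hflat := flat_grpFrom t l []
      have hOK := OK_grpFrom t l [] hl (by simp)
      have hF := (FT (grpFrom l [] t) hOK).1
      rw [hflat] at hF
      simpa using hF
    · have hl' : isHdr l = false := by
        cases hbb : isHdr l
        · rfl
        · exact absurd hbb hl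
      simp only [preSplit]
      rw [if_neg hl]
      rw [rws_keep l t hl', ih]
      simp

def finSp (st : List String × List (String × List String) × Option (String × List String)) :
    List String × List (String × List String) :=
  (st.1, st.2.1 ++ (match st.2.2 with | none => [] | some c => [c]))

theorem foldl_some : ∀ (ls : List String) (pre : List String)
    (secs : List (String × List String)) (h : String) (b : List String),
    finSp (ls.foldl stepSplit (pre, secs, some (h, b))) = (pre, secs ++ grpFrom h b ls) := by
  intro ls
  induction ls with
  | nil => intro pre secs h b; simp [finSp, grpFrom]
  | cons l t ih =>
    intro pre secs h b
    by_cases hl : isHdr l = true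
    · have hlc := hl
      simp [isHdr] at hlc
      simp only [List.foldl_cons, stepSplit]
      rw [if_pos (by simp [hlc])]
      rw [ih]
      simp [grpFrom, hl]
    · have hlc := hl
      simp [isHdr] at hlc
      simp only [List.foldl_cons, stepSplit]
      rw [if_neg (by simp [hlc])]
      rw [ih]
      simp [grpFrom, hl]

theorem foldl_none : ∀ (ls : List String) (pre : List String)
    (secs : List (String × List String)),
    finSp (ls.foldl stepSplit (pre, secs, none)) = (pre ++ (preSplit ls).1, secs ++ (preSplit ls).2) := by
  intro ls
  induction ls with
  | nil => intro pre secs; simp [finSp, preSplit]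
  | cons l t ih =>
    intro pre secs
    by_cases hl : isHdr l = true
    · have hlc := hl
      simp [isHdr] at hlc
      simp only [List.foldl_cons, stepSplit]
      rw [if_pos (by simp [hlc])]
      rw [foldl_some]
      simp [preSplit, hl]
    · have hlc := hl
      simp [isHdr] at hlc
      simp only [List.foldl_cons, stepSplit]
      rw [if_neg (by simp [hlc])]
      rw [ih]
      simp [preSplit, hl]

theorem foldl_filt : ∀ (secs : List (String × List String)) (res : List String) (sk : Bool),
    (secs.foldl stepFilt (res, sk)).1 = res ++ filt sk secs := by
  intro secs
  induction secs with
  | nil => intro res sk; simp [filt]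
  | cons p t ih =>
    intro res sk
    obtain ⟨h, b⟩ := p
    cases hw : wsHdr h
    · have hwc := hw
      simp [wsHdr] at hwc
      simp only [List.foldl_cons, stepFilt]
      rw [if_neg (by simp [hwc])]
      rw [if_pos (by simp [hwc])]
      rw [ih]
      simp [filt, hw, hwc]
    · have hwc := hw
      simp [wsHdr] at hwc
      cases hsk : sk
      · cases he : PySem.Str.endswith (PySem.Str.strip h) "]"
        · have hec := he
          simp at hec
          simp only [List.foldl_cons, stepFilt]
          rw [if_neg (by simp)]
          rw [if_pos (by simp [hwc, hec])]
          rw [ih]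
          simp [filt, hw, hwc, hec]
        · have hec := he
          simp at hec
          simp only [List.foldl_cons, stepFilt]
          rw [if_neg (by simp)]
          rw [if_neg (by simp [hwc, hec])]
          rw [ih]
          simp [filt, hw, hwc, hec]
      · simp only [List.foldl_cons, stepFilt]
        rw [if_pos (by simp [hwc])]
        rw [ih]
        simp [filt, hw]

theorem B_eq (ls : List String) :
    remove_workspace_section_alt ls = (preSplit ls).1 ++ filt false (preSplit ls).2 := by
  simp only [remove_workspace_section_alt]
  have h := foldl_none ls [] []
  simp only [List.nil_append] at h
  have h1 : (ls.foldl stepSplit ([], [], none)).1 = (preSplit ls).1 := by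
    have := congrArg Prod.fst h; simpa [finSp] using this
  have h2 : (ls.foldl stepSplit ([], [], none)).2.1 ++
      (match (ls.foldl stepSplit ([], [], none)).2.2 with | none => [] | some c => [c]) =
      (preSplit ls).2 := by
    have := congrArg Prod.snd h; simpa [finSp] using this
  rw [h2, foldl_filt, h1]

-- ===== VERDICT (by name: the statement is the Claim_ definition above) =====
theorem remove_workspace_section_spec : Claim_equal_remove_workspace_section := by
  intro ls _
  unfold Spec_remove_workspace_section
  rw [A_eq, B_eq]
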